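-- pv_equiv track=rewrite | github.com/eLifePathways/sciencebeam-grobid-metadata-enricher | src/grobid_metadata_enricher/pipeline.py | format_candidate_blocks
-- ===== SOURCE A (Python) =====
-- from typing import Any, Callable, Dict, List, Optional, Sequence, Tuple
--
-- def format_candidate_blocks(
--     blocks: Sequence[Tuple[str, str]],
--     max_block_chars: int = 1200,
--     max_total_chars: int = 8000,
-- ) -> str:
--     parts: List[str] = []
--     total = 0
--     for index, (source, text) in enumerate(blocks, start=1):
--         chunk = f"[{index}] source={source}\n{text[:max_block_chars]}\n"
--         if total + len(chunk) > max_total_chars: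
--             break
--         parts.append(chunk)
--         total += len(chunk)
--     return "\n".join(parts)
-- ===== SOURCE B (Python) =====
-- from typing import List, Sequence, Tuple
-- from itertools import accumulate
--
--
-- def format_candidate_blocks(
--     blocks: Sequence[Tuple[str, str]],
--     max_block_chars: int = 1200,
--     max_total_chars: int = 8000,
-- ) -> str:
--     # Pass 1: build every formatted chunk.
--     chunks: List[str] = [
--         f"[{i}] source={source}\n{text[:max_block_chars]}\n"
--         for i, (source, text) in enumerate(blocks, start=1)
--     ]
--     # Pass 2: largest prefix whose running length total never exceeds the cap.
--     k = 0
--     for total in accumulate(len(c) for c in chunks):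
--         if total > max_total_chars:
--             break
--         k += 1
--     return "\n".join(chunks[:k])
-- ===== Notes on version B (the rewrite author's own statement) =====
-- stated objective: alternative
-- what changed: Replaced A's single accumulate-and-break loop (mutable parts/total state) by a two-pass structure: build the full list of formatted chunks first, then find the largest non-overflowing prefix length via itertools.accumulate, and join that prefix.
import Mathlib
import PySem

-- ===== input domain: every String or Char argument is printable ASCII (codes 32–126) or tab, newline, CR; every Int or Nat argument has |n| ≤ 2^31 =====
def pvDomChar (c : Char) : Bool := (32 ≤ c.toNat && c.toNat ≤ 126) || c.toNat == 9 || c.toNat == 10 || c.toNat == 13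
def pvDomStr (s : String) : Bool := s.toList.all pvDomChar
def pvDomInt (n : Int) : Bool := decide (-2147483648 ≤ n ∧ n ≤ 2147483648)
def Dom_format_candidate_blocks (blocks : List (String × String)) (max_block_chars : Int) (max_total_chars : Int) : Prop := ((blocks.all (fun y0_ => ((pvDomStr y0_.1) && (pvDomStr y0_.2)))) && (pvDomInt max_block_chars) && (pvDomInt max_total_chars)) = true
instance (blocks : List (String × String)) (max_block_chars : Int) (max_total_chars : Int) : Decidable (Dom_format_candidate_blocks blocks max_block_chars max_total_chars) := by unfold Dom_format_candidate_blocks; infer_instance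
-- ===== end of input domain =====

-- B rebuilds A's accumulate-and-break loop as build-all-chunks then take the largest
-- non-overflowing prefix (objective: alternative decomposition, same cost).

-- ===== PORT A =====
-- the f-string chunk for one enumerated block (shared shape; each port uses it as its Python writes it)
def pvChunk (max_block_chars : Int) (p : Int × (String × String)) : String :=
  "[" ++ PySem.Int.toStr p.1 ++ "] source=" ++ p.2.1 ++ "\n" ++
    PySem.Str.slice p.2.2 none (some max_block_chars) ++ "\n"

-- A's for-loop with break: structural recursion over enumerate(blocks, 1) carrying (parts, total)
def pvLoopA (max_block_chars max_total_chars : Int) :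
    List (Int × (String × String)) → List String → Int → List String
  | [], parts, _ => parts
  | it :: rest, parts, total =>
    let chunk := pvChunk max_block_chars it
    if total + PySem.Str.len chunk > max_total_chars then parts
    else pvLoopA max_block_chars max_total_chars rest (parts ++ [chunk])
      (total + PySem.Str.len chunk)

def format_candidate_blocks (blocks : List (String × String)) (max_block_chars : Int) (max_total_chars : Int) : String :=
  PySem.Str.join "\n" (pvLoopA max_block_chars max_total_chars (PySem.List.enumerate blocks 1) [] 0)

-- ===== PORT B =====
-- pass 2: length of the largest prefix whose running total stays ≤ the cap
def pvPrefixLen (max_total_chars : Int) : List Int → Int → Nat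
  | [], _ => 0
  | l :: ls, total =>
    if total + l > max_total_chars then 0
    else 1 + pvPrefixLen max_total_chars ls (total + l)

def format_candidate_blocks_alt (blocks : List (String × String)) (max_block_chars : Int) (max_total_chars : Int) : String :=
  let chunks := (PySem.List.enumerate blocks 1).map (pvChunk max_block_chars)
  let k := pvPrefixLen max_total_chars (chunks.map PySem.Str.len) 0
  PySem.Str.join "\n" (chunks.take k)

-- ===== PRECONDITION & SPEC =====
def Spec_format_candidate_blocks (blocks : List (String × String)) (max_block_chars : Int) (max_total_chars : Int) (out : String) : Prop := out = format_candidate_blocks_alt blocks max_block_chars max_total_chars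
instance (blocks : List (String × String)) (max_block_chars : Int) (max_total_chars : Int) (out : String) : Decidable (Spec_format_candidate_blocks blocks max_block_chars max_total_chars out) := by unfold Spec_format_candidate_blocks; infer_instance

-- ===== CLAIM (what is proved, stated in full; the proofs are below) =====
def Claim_equal_format_candidate_blocks : Prop := ∀ (blocks : List (String × String)) (max_block_chars : Int) (max_total_chars : Int), Dom_format_candidate_blocks blocks max_block_chars max_total_chars → Spec_format_candidate_blocks blocks max_block_chars max_total_chars (format_candidate_blocks blocks max_block_chars max_total_chars)

-- ===== LEMMAS AND PROOFS =====
theorem pvLoopA_eq (mbc mtc : Int) :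
    ∀ (items : List (Int × (String × String))) (parts : List String) (total : Int),
      pvLoopA mbc mtc items parts total =
        parts ++ (items.map (pvChunk mbc)).take
          (pvPrefixLen mtc ((items.map (pvChunk mbc)).map PySem.Str.len) total) := by
  intro items
  induction items with
  | nil => intro parts total; simp [pvLoopA, pvPrefixLen]
  | cons it rest ih =>
    intro parts total
    simp only [pvLoopA, List.map_cons, pvPrefixLen]
    split_ifs with h
    · simp
    · rw [ih]
      rw [Nat.add_comm 1]
      simp [List.take_succ_cons]

-- ===== VERDICT (by name: the statement is the Claim_ definition above) =====
theorem format_candidate_blocks_spec : Claim_equal_format_candidate_blocks := by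
  intro blocks mbc mtc _
  unfold Spec_format_candidate_blocks format_candidate_blocks format_candidate_blocks_alt
  rw [pvLoopA_eq]
  simp
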